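-- pv_equiv track=rewrite | github.com/yash-sharma1511/Python_training | class11/salary.py | sort_by_salary
-- ===== SOURCE A (Python) =====
-- def sort_by_salary(data):
--     department_dict = {}
--     for department, employee, salary in data:
--         if department not in department_dict:
--             department_dict[department] = []
--         department_dict[department].append((employee, salary))
--     for department in department_dict:
--         department_dict[department].sort(key=lambda x: x[1], reverse=True)
--
--     return department_dict
-- ===== SOURCE B (Python) =====
-- def sort_by_salary(data):
--     result = {department: [] for department, _, _ in data}
--     for department, employee, salary in sorted(data, key=lambda x: x[2], reverse=True):
--         result[department].append((employee, salary))
--     return result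
-- ===== Notes on version B (the rewrite author's own statement) =====
-- stated objective: alternative
-- what changed: B builds the department skeleton in one pass, sorts the whole data list once by salary descending with a single stable sort, then distributes rows into their departments in a second pass, instead of A's incremental grouping followed by a separate sort per department.
import Mathlib
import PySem

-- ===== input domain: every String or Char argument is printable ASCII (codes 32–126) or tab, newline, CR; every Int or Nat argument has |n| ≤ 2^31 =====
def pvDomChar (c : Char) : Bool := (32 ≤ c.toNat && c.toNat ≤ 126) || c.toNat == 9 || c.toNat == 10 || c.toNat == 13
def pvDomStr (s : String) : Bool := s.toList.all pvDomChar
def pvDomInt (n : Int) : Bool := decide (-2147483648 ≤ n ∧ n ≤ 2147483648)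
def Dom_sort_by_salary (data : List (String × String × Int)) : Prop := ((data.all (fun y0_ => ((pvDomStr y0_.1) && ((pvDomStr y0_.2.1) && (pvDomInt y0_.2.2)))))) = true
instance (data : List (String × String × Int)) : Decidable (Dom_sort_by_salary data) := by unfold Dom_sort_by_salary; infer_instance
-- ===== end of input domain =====

-- B replaces A's per-department sorts by one global stable sort plus a distribution pass (same asymptotic cost, different decomposition).

-- ===== PORT A =====
def sort_by_salary (data : List (String × String × Int)) : List (String × List (String × Int)) :=
  -- first loop: group the rows by department into a dict, first-appearance key order
  let dd : PySem.Dict String (List (String × Int)) :=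
    data.foldl (fun dd t =>
      let dd := if dd.contains t.1 then dd else dd.insert t.1 ([] : List (String × Int))
      dd.modify t.1 [] (fun v => v ++ [t.2])) ⟨[]⟩
  -- second loop: for department in department_dict: department_dict[department].sort(key=lambda x: x[1], reverse=True)
  (dd.keys.foldl (fun acc dep => acc.modify dep [] (fun v => PySem.List.sorted v (fun x => x.2) true)) dd).items

-- ===== PORT B =====
def sort_by_salary_alt (data : List (String × String × Int)) : List (String × List (String × Int)) :=
  -- skeleton pass: {department: [] for department, _, _ in data}
  let result : PySem.Dict String (List (String × Int)) :=
    data.foldl (fun d t => d.insert t.1 ([] : List (String × Int))) ⟨[]⟩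
  -- one global stable sort by salary, descending
  let rows := PySem.List.sorted data (fun t => t.2.2) true
  -- distribution pass: result[department].append((employee, salary))
  (rows.foldl (fun d t => d.modify t.1 [] (fun v => v ++ [t.2])) result).items

-- ===== PRECONDITION & SPEC =====
def Spec_sort_by_salary (data : List (String × String × Int)) (out : List (String × List (String × Int))) : Prop := out = sort_by_salary_alt data
instance (data : List (String × String × Int)) (out : List (String × List (String × Int))) : Decidable (Spec_sort_by_salary data out) := by unfold Spec_sort_by_salary; infer_instance

-- ===== CLAIM (what is proved, stated in full; the proofs are below) =====
def Claim_equal_sort_by_salary : Prop := ∀ (data : List (String × String × Int)), Dom_sort_by_salary data → Spec_sort_by_salary data (sort_by_salary data)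

-- ===== LEMMAS AND PROOFS =====

def pvGm (d : String) (l : List (String × String × Int)) : List (String × Int) :=
  (l.filter (fun t => t.1 == d)).map (fun t => t.2)

def pvDeps (l : List (String × String × Int)) : List String := PySem.Set.ofList (l.map (fun t => t.1))

lemma pvGm_append (d : String) (l1 l2 : List (String × String × Int)) :
    pvGm d (l1 ++ l2) = pvGm d l1 ++ pvGm d l2 := by
  simp [pvGm, List.filter_append]

lemma pvGm_nil_of_not_mem (d : String) (l : List (String × String × Int))
    (h : d ∉ l.map (fun t => t.1)) : pvGm d l = [] := by
  simp only [pvGm, List.map_eq_nil_iff, List.filter_eq_nil_iff]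
  intro t ht hb
  exact h (List.mem_map.2 ⟨t, ht, by simpa using hb.symm⟩)

lemma pvMem_pvDeps (d : String) (l : List (String × String × Int)) :
    d ∈ pvDeps l ↔ d ∈ l.map (fun t => t.1) := PySem.Set.mem_ofList _ _

lemma pvDeps_append_singleton (pre : List (String × String × Int)) (t : String × String × Int) :
    pvDeps (pre ++ [t]) = if t.1 ∈ pvDeps pre then pvDeps pre else pvDeps pre ++ [t.1] := by
  show PySem.Set.ofList _ = _
  rw [List.map_append, PySem.Set.ofList, List.foldl_append]
  show PySem.Set.add (pvDeps pre) t.1 = _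
  rw [PySem.Set.add]
  by_cases h : t.1 ∈ pvDeps pre
  · rw [if_pos (by simpa [List.elem_iff] using h), if_pos h]
  · rw [if_neg (by simpa [List.elem_iff] using h), if_neg h]

lemma pvContains_mapform (ds : List String) (f : String → List (String × Int)) (k : String) :
    PySem.Dict.contains (⟨ds.map (fun d => (d, f d))⟩ : PySem.Dict String (List (String × Int))) k
      = decide (k ∈ ds) := by
  simp only [PySem.Dict.contains, List.any_map, Function.comp_def]
  induction ds with
  | nil => simp
  | cons d ds ih =>
    by_cases h : d = k
    · simp [h]
    · simp only [List.mem_cons, List.any_cons, ih]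
      have h1 : (d == k) = false := by simp [h]
      rw [h1, Bool.false_or]
      simp [Ne.symm h]

lemma pvGetD_mapform (ds : List String) (f : String → List (String × Int)) (k : String)
    (dflt : List (String × Int)) (hk : k ∈ ds) :
    PySem.Dict.getD (⟨ds.map (fun d => (d, f d))⟩ : PySem.Dict String (List (String × Int))) k dflt = f k := by
  induction ds with
  | nil => simp at hk
  | cons d ds ih =>
    by_cases hd : d = k
    · subst hd; simp [PySem.Dict.getD, PySem.Dict.get?]
    · simp only [PySem.Dict.getD, PySem.Dict.get?, List.map_cons, List.find?_cons] at *
      have : (d == k) = false := by simp [hd]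
      rw [this]
      exact ih (by rcases List.mem_cons.1 hk with h | h; exact absurd h.symm hd; exact h)

lemma pvInsert_mapform (ds : List String) (f : String → List (String × Int)) (k : String)
    (v : List (String × Int)) (hk : k ∈ ds) :
    PySem.Dict.insert (⟨ds.map (fun d => (d, f d))⟩ : PySem.Dict String (List (String × Int))) k v
      = ⟨ds.map (fun d => (d, if d = k then v else f d))⟩ := by
  rw [PySem.Dict.insert]
  rw [if_pos (by rw [pvContains_mapform]; exact decide_eq_true hk)]
  congr 1
  rw [List.map_map]
  refine List.map_congr_left (fun d _ => ?_)
  by_cases hd : d = k <;> simp [hd]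

lemma pvInsert_mapform_new (ds : List String) (f : String → List (String × Int)) (k : String)
    (v : List (String × Int)) (hk : k ∉ ds) :
    PySem.Dict.insert (⟨ds.map (fun d => (d, f d))⟩ : PySem.Dict String (List (String × Int))) k v
      = ⟨ds.map (fun d => (d, f d)) ++ [(k, v)]⟩ := by
  rw [PySem.Dict.insert, if_neg (by rw [pvContains_mapform]; simpa using hk)]

lemma pvModify_mapform (ds : List String) (f : String → List (String × Int)) (k : String)
    (g : List (String × Int) → List (String × Int)) (hk : k ∈ ds) :
    PySem.Dict.modify (⟨ds.map (fun d => (d, f d))⟩ : PySem.Dict String (List (String × Int))) k [] g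
      = ⟨ds.map (fun d => (d, if d = k then g (f d) else f d))⟩ := by
  rw [PySem.Dict.modify, pvGetD_mapform ds f k [] hk, pvInsert_mapform ds f k (g (f k)) hk]
  congr 1
  refine List.map_congr_left (fun d _ => ?_)
  by_cases hd : d = k <;> simp [hd]

def pvDictA (l : List (String × String × Int)) : PySem.Dict String (List (String × Int)) :=
  ⟨(pvDeps l).map (fun d => (d, pvGm d l))⟩

lemma pvStepA (pre : List (String × String × Int)) (t : String × String × Int) :
    (fun (dd : PySem.Dict String (List (String × Int))) (t : String × String × Int) =>
      let dd := if dd.contains t.1 then dd else dd.insert t.1 ([] : List (String × Int))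
      dd.modify t.1 [] (fun v => v ++ [t.2])) (pvDictA pre) t = pvDictA (pre ++ [t]) := by
  show (if PySem.Dict.contains (pvDictA pre) t.1 then pvDictA pre
        else PySem.Dict.insert (pvDictA pre) t.1 []).modify t.1 [] (fun v => v ++ [t.2]) = _
  by_cases hm : t.1 ∈ pvDeps pre
  · rw [pvDictA, if_pos (by rw [pvContains_mapform]; exact decide_eq_true hm)]
    rw [pvModify_mapform _ _ _ _ hm]
    rw [pvDictA, pvDeps_append_singleton, if_pos hm]
    congr 1
    refine List.map_congr_left (fun d _ => ?_)
    rw [pvGm_append]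
    by_cases hd : d = t.1
    · subst hd; simp [pvGm]
    · have : (t.1 == d) = false := by simp [Ne.symm hd]
      simp [pvGm, this, hd]
  · rw [pvDictA, if_neg (by rw [pvContains_mapform]; simpa using hm)]
    rw [pvInsert_mapform_new _ _ _ _ hm]
    have hform : (⟨(pvDeps pre).map (fun d => (d, pvGm d pre)) ++ [(t.1, ([] : List (String × Int)))]⟩ :
        PySem.Dict String (List (String × Int)))
        = ⟨(pvDeps pre ++ [t.1]).map (fun d => (d, if d = t.1 then [] else pvGm d pre))⟩ := by
      congr 1
      rw [List.map_append]
      congr 1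
      · refine (List.map_congr_left (fun d hd => ?_)).symm
        have hne : d ≠ t.1 := by intro h; subst h; exact hm hd
        rw [if_neg hne]
      · simp
    rw [hform, pvModify_mapform _ _ _ _ (by simp)]
    rw [pvDictA, pvDeps_append_singleton, if_neg hm]
    congr 1
    refine List.map_congr_left (fun d hd => ?_)
    have hnp : t.1 ∉ pre.map (fun t => t.1) := fun h => hm ((pvMem_pvDeps _ _).2 h)
    rw [pvGm_append]
    by_cases hdt : d = t.1
    · subst hdt
      rw [if_pos rfl, pvGm_nil_of_not_mem _ _ hnp]
      simp [pvGm]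
    · have : (t.1 == d) = false := by simp [Ne.symm hdt]
      simp [pvGm, this, hdt]

lemma pvFoldA (xs : List (String × String × Int)) : ∀ pre,
    xs.foldl (fun dd t =>
      let dd := if dd.contains t.1 then dd else dd.insert t.1 ([] : List (String × Int))
      dd.modify t.1 [] (fun v => v ++ [t.2])) (pvDictA pre) = pvDictA (pre ++ xs) := by
  induction xs with
  | nil => intro pre; simp
  | cons x xs ih =>
    intro pre
    rw [List.foldl_cons]
    have h2 : List.foldl (fun (dd : PySem.Dict String (List (String × Int))) (t : String × String × Int) =>
        let dd := if dd.contains t.1 then dd else dd.insert t.1 ([] : List (String × Int))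
        dd.modify t.1 [] (fun v => v ++ [t.2]))
        ((fun (dd : PySem.Dict String (List (String × Int))) (t : String × String × Int) =>
          let dd := if dd.contains t.1 then dd else dd.insert t.1 ([] : List (String × Int))
          dd.modify t.1 [] (fun v => v ++ [t.2])) (pvDictA pre) x) xs = pvDictA (pre ++ x :: xs) := by
      rw [pvStepA pre x, ih (pre ++ [x])]
      simp
    exact h2

lemma pvStepSk (pre : List (String × String × Int)) (t : String × String × Int) :
    PySem.Dict.insert (⟨(pvDeps pre).map (fun d => (d, ([] : List (String × Int))))⟩ :
        PySem.Dict String (List (String × Int))) t.1 ([] : List (String × Int))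
      = ⟨(pvDeps (pre ++ [t])).map (fun d => (d, ([] : List (String × Int))))⟩ := by
  rw [pvDeps_append_singleton]
  by_cases hm : t.1 ∈ pvDeps pre
  · rw [pvInsert_mapform _ _ _ _ hm, if_pos hm]
    congr 1
    refine List.map_congr_left (fun d _ => ?_)
    by_cases hd : d = t.1 <;> simp [hd]
  · rw [pvInsert_mapform_new _ _ _ _ hm, if_neg hm]
    simp

lemma pvFoldSk (xs : List (String × String × Int)) : ∀ pre,
    xs.foldl (fun d t => d.insert t.1 ([] : List (String × Int)))
        (⟨(pvDeps pre).map (fun d => (d, ([] : List (String × Int))))⟩ : PySem.Dict String (List (String × Int)))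
      = ⟨(pvDeps (pre ++ xs)).map (fun d => (d, ([] : List (String × Int))))⟩ := by
  induction xs with
  | nil => intro pre; simp
  | cons x xs ih =>
    intro pre
    rw [List.foldl_cons, pvStepSk pre x, ih (pre ++ [x])]
    simp

lemma pvDistrib (rows : List (String × String × Int)) (ds : List String) :
    ∀ f : String → List (String × Int), (∀ r ∈ rows, r.1 ∈ ds) →
    rows.foldl (fun d t => d.modify t.1 [] (fun v => v ++ [t.2]))
        (⟨ds.map (fun d => (d, f d))⟩ : PySem.Dict String (List (String × Int)))
      = ⟨ds.map (fun d => (d, f d ++ pvGm d rows))⟩ := by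
  induction rows with
  | nil => intro f _; simp [pvGm]
  | cons r rs ih =>
    intro f hmem
    rw [List.foldl_cons, pvModify_mapform _ _ _ _ (hmem r (by simp))]
    rw [ih _ (fun x hx => hmem x (by simp [hx]))]
    congr 1
    refine List.map_congr_left (fun d _ => ?_)
    by_cases hd : d = r.1
    · subst hd
      simp [pvGm]
    · have : (r.1 == d) = false := by simp [Ne.symm hd]
      simp [pvGm, this, hd]

lemma pvSortLoop (ks : List String) (ds : List String) :
    ∀ f : String → List (String × Int), (∀ k ∈ ks, k ∈ ds) →
    ks.foldl (fun acc dep => acc.modify dep [] (fun v => PySem.List.sorted v (fun x => x.2) true))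
        (⟨ds.map (fun d => (d, f d))⟩ : PySem.Dict String (List (String × Int)))
      = ⟨ds.map (fun d => (d, if d ∈ ks then PySem.List.sorted (f d) (fun x => x.2) true else f d))⟩ := by
  induction ks with
  | nil => intro f _; simp
  | cons k ks ih =>
    intro f hmem
    rw [List.foldl_cons, pvModify_mapform _ _ _ _ (hmem k (by simp))]
    rw [ih _ (fun x hx => hmem x (by simp [hx]))]
    congr 1
    refine List.map_congr_left (fun d _ => ?_)
    by_cases hks : d ∈ ks
    · by_cases hdk : d = k <;>
        simp [hks, hdk, PySem.List.sorted_rev_sorted_rev]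
    · by_cases hdk : d = k <;> simp [hks, hdk]

lemma pvSorted_append_singleton (l : List (String × String × Int)) (x : String × String × Int) :
    PySem.List.sorted (l ++ [x]) (fun t => t.2.2) true
      = PySem.List.insertBy (fun a b => decide (b.2.2 < a.2.2)) x (PySem.List.sorted l (fun t => t.2.2) true) := by
  rw [PySem.List.sorted_rev_eq_foldl_insertBy, PySem.List.sorted_rev_eq_foldl_insertBy, List.foldl_append]
  rfl

lemma pvSorted2_append_singleton (l : List (String × Int)) (x : String × Int) :
    PySem.List.sorted (l ++ [x]) (fun t => t.2) true
      = PySem.List.insertBy (fun a b => decide (b.2 < a.2)) x (PySem.List.sorted l (fun t => t.2) true) := by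
  rw [PySem.List.sorted_rev_eq_foldl_insertBy, PySem.List.sorted_rev_eq_foldl_insertBy, List.foldl_append]
  rfl

lemma pvInsertBy_front (x : String × String × Int) (zs : List (String × Int))
    (h : ∀ z ∈ zs, z.2 < x.2.2) :
    PySem.List.insertBy (fun a b => decide (b.2 < a.2)) x.2 zs = x.2 :: zs := by
  cases zs with
  | nil => rfl
  | cons z zs =>
    rw [PySem.List.insertBy]
    rw [if_pos (decide_eq_true (h z (by simp)))]

lemma pvHelperIns (d : String) (x : String × String × Int) :
    ∀ ys : List (String × String × Int), ys.Pairwise (fun a b => b.2.2 ≤ a.2.2) →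
    pvGm d (PySem.List.insertBy (fun a b => decide (b.2.2 < a.2.2)) x ys)
      = if x.1 == d then PySem.List.insertBy (fun a b => decide (b.2 < a.2)) x.2 (pvGm d ys)
        else pvGm d ys := by
  intro ys
  induction ys with
  | nil =>
    intro _
    by_cases hx : x.1 = d <;> simp [PySem.List.insertBy, pvGm, hx]
  | cons y ys ih =>
    intro hp
    have egm : ∀ zs : List (String × String × Int),
        pvGm d (y :: zs) = (if y.1 == d then [y.2] else []) ++ pvGm d zs := by
      intro zs
      by_cases hy : y.1 = d <;> simp [pvGm, hy]
    rw [PySem.List.insertBy]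
    by_cases hlt : y.2.2 < x.2.2
    · rw [if_pos (decide_eq_true hlt)]
      by_cases hx : x.1 = d
      · have hall : ∀ z ∈ pvGm d (y :: ys), z.2 < x.2.2 := by
          intro z hz
          rcases List.mem_map.1 hz with ⟨t, ht, rfl⟩
          rcases List.mem_filter.1 ht with ⟨htm, _⟩
          rcases List.mem_cons.1 htm with h | h
          · subst h; exact hlt
          · exact lt_of_le_of_lt ((List.pairwise_cons.1 hp).1 t h) hlt
        rw [if_pos (by simp [hx]), pvInsertBy_front x _ hall]
        simp [pvGm, hx]
      · rw [if_neg (by simp [hx])]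
        simp [pvGm, hx]
    · rw [if_neg (by simpa using hlt)]
      have htail := ih (List.pairwise_cons.1 hp).2
      rw [egm, egm, htail]
      by_cases hx : x.1 = d
      · have hxb : (x.1 == d) = true := by simp [hx]
        by_cases hy : y.1 = d
        · have hyb : (y.1 == d) = true := by simp [hy]
          simp only [hxb, hyb, if_true]
          show y.2 :: _ = PySem.List.insertBy _ x.2 (y.2 :: _)
          rw [PySem.List.insertBy, if_neg (by simpa using hlt)]
          rfl
        · have hyb : (y.1 == d) = false := by simp [hy]
          simp only [hxb, hyb, if_true, Bool.false_eq_true, if_false, List.nil_append]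
      · have hxb : (x.1 == d) = false := by simp [hx]
        simp only [hxb, Bool.false_eq_true, if_false]

lemma pvSortComm (d : String) (l : List (String × String × Int)) :
    PySem.List.sorted (pvGm d l) (fun x => x.2) true
      = pvGm d (PySem.List.sorted l (fun t => t.2.2) true) := by
  induction l using List.reverseRecOn with
  | nil => rfl
  | append_singleton l x ih =>
    rw [pvSorted_append_singleton,
        pvHelperIns d x _ (PySem.List.sorted_pairwise_rev l (fun t => t.2.2)), ← ih]
    rw [pvGm_append]
    by_cases hx : x.1 = d
    · have : pvGm d [x] = [x.2] := by simp [pvGm, hx]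
      rw [if_pos (by simp [hx]), this, pvSorted2_append_singleton]
    · have : pvGm d [x] = [] := by simp [pvGm, hx]
      rw [if_neg (by simp [hx]), this, List.append_nil]

lemma pvKeys_dictA (data : List (String × String × Int)) : (pvDictA data).keys = pvDeps data := by
  simp [PySem.Dict.keys, pvDictA, List.map_map, Function.comp_def]


-- ===== VERDICT (by name: the statement is the Claim_ definition above) =====
theorem sort_by_salary_spec : Claim_equal_sort_by_salary := by
  intro data _
  show sort_by_salary data = sort_by_salary_alt data
  have hA : sort_by_salary data
      = (pvDeps data).map (fun d => (d, PySem.List.sorted (pvGm d data) (fun x => x.2) true)) := by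
    show PySem.Dict.items (List.foldl
        (fun acc dep => acc.modify dep [] (fun v => PySem.List.sorted v (fun x => x.2) true))
        (List.foldl (fun (dd : PySem.Dict String (List (String × Int))) (t : String × String × Int) =>
          let dd := if dd.contains t.1 then dd else dd.insert t.1 ([] : List (String × Int))
          dd.modify t.1 [] (fun v => v ++ [t.2])) (⟨[]⟩ : PySem.Dict String (List (String × Int))) data)
        (List.foldl (fun (dd : PySem.Dict String (List (String × Int))) (t : String × String × Int) =>
          let dd := if dd.contains t.1 then dd else dd.insert t.1 ([] : List (String × Int))
          dd.modify t.1 [] (fun v => v ++ [t.2])) (⟨[]⟩ : PySem.Dict String (List (String × Int))) data).keys) = _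
    have h0 : (⟨[]⟩ : PySem.Dict String (List (String × Int))) = pvDictA [] := rfl
    rw [h0, pvFoldA data [], List.nil_append, pvKeys_dictA]
    rw [pvDictA, pvSortLoop (pvDeps data) (pvDeps data) _ (fun k hk => hk)]
    refine List.map_congr_left (fun d hd => ?_)
    rw [if_pos hd]
  have hB : sort_by_salary_alt data
      = (pvDeps data).map (fun d => (d, pvGm d (PySem.List.sorted data (fun t => t.2.2) true))) := by
    show PySem.Dict.items (List.foldl _
        (List.foldl (fun (d : PySem.Dict String (List (String × Int))) (t : String × String × Int) =>
          d.insert t.1 ([] : List (String × Int))) (⟨[]⟩ : PySem.Dict String (List (String × Int))) data)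
        (PySem.List.sorted data (fun t => t.2.2) true)) = _
    have h0 : (⟨[]⟩ : PySem.Dict String (List (String × Int)))
        = ⟨(pvDeps []).map (fun d => (d, ([] : List (String × Int))))⟩ := rfl
    rw [h0, pvFoldSk data [], List.nil_append]
    rw [pvDistrib _ _ _ (fun r hr => (pvMem_pvDeps _ _).2
      (List.mem_map.2 ⟨r, (PySem.List.mem_sorted data _ _ r).1 hr, rfl⟩))]
    simp
  rw [hA, hB]
  exact List.map_congr_left (fun d _ => by rw [pvSortComm])
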